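-- pv_equiv track=rewrite | github.com/iTecAI/XoriensLair | api/pycritter.py | get_prof_cr
-- ===== SOURCE A (Python) =====
-- def get_prof_cr(cr): #determines proficiency bonus from challenge rating
--     ref = {
--         4:2,
--         8:3,
--         12:4,
--         16:5,
--         20:6,
--         24:7,
--         28:8,
--         30:9
--     } #dict of MM Page 8 proficiency bonuses
--     keyref = [4,8,12,16,20,24,28,30] #order of keys to check
--     for i in keyref: #check keys
--         if cr <= i:
--             return ref[i]
-- ===== SOURCE B (Python) =====
-- def get_prof_cr(cr):  # closed-form: ceil(cr/4)+1, clamped to 2, None above CR 30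
--     if cr > 30:
--         return None
--     return max(2, -(-cr // 4) + 1)
-- ===== Notes on version B (the rewrite author's own statement) =====
-- stated objective: simpler
-- what changed: Replaced the dict/keylist linear scan with a closed-form arithmetic formula: None for cr > 30, else max(2, ceil(cr/4)+1) via integer ceiling division.
import Mathlib
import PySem

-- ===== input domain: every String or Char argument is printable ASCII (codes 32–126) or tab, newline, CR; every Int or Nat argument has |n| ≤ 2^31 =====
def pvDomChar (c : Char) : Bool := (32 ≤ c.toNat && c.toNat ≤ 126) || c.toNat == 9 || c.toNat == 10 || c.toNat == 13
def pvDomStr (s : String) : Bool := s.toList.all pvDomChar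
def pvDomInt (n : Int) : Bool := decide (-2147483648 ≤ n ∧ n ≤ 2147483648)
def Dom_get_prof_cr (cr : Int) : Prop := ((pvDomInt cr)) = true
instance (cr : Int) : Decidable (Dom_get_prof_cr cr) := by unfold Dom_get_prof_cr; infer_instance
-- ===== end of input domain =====

-- B replaces A's lookup-table linear scan with a closed-form formula (None above 30, else max(2, ceil(cr/4)+1)); objective: simpler.
-- ===== PORT A =====
def pyGetProfCrGo (ref : PySem.Dict Int Int) (cr : Int) : List Int → Option Int
  | [] => none
  | i :: rest => if cr ≤ i then PySem.Dict.get? ref i else pyGetProfCrGo ref cr rest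

def get_prof_cr (cr : Int) : Option Int :=
  let ref : PySem.Dict Int Int :=
    PySem.Dict.ofList [(4, 2), (8, 3), (12, 4), (16, 5), (20, 6), (24, 7), (28, 8), (30, 9)]
  let keyref : List Int := [4, 8, 12, 16, 20, 24, 28, 30]
  pyGetProfCrGo ref cr keyref

-- ===== PORT B =====
def get_prof_cr_alt (cr : Int) : Option Int :=
  if cr > 30 then none
  else some (max 2 (-(PySem.Int.floordiv (-cr) 4) + 1))

-- ===== PRECONDITION & SPEC =====
def Spec_get_prof_cr (cr : Int) (out : Option Int) : Prop := out = get_prof_cr_alt cr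
instance (cr : Int) (out : Option Int) : Decidable (Spec_get_prof_cr cr out) := by unfold Spec_get_prof_cr; infer_instance

-- ===== CLAIM (what is proved, stated in full; the proofs are below) =====
def Claim_equal_get_prof_cr : Prop := ∀ (cr : Int), Dom_get_prof_cr cr → Spec_get_prof_cr cr (get_prof_cr cr)

-- ===== LEMMAS AND PROOFS =====

-- ===== VERDICT (by name: the statement is the Claim_ definition above) =====
theorem get_prof_cr_spec : Claim_equal_get_prof_cr := by
  intro cr _
  unfold Spec_get_prof_cr get_prof_cr get_prof_cr_alt
  simp only [pyGetProfCrGo,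
    PySem.Int.floordiv_eq_ediv_of_pos (a := -cr) (b := 4) (by omega),
    show PySem.Dict.get? (PySem.Dict.ofList [((4:Int),(2:Int)), (8, 3), (12, 4), (16, 5), (20, 6), (24, 7), (28, 8), (30, 9)]) 4 = some 2 from by decide,
    show PySem.Dict.get? (PySem.Dict.ofList [((4:Int),(2:Int)), (8, 3), (12, 4), (16, 5), (20, 6), (24, 7), (28, 8), (30, 9)]) 8 = some 3 from by decide,
    show PySem.Dict.get? (PySem.Dict.ofList [((4:Int),(2:Int)), (8, 3), (12, 4), (16, 5), (20, 6), (24, 7), (28, 8), (30, 9)]) 12 = some 4 from by decide,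
    show PySem.Dict.get? (PySem.Dict.ofList [((4:Int),(2:Int)), (8, 3), (12, 4), (16, 5), (20, 6), (24, 7), (28, 8), (30, 9)]) 16 = some 5 from by decide,
    show PySem.Dict.get? (PySem.Dict.ofList [((4:Int),(2:Int)), (8, 3), (12, 4), (16, 5), (20, 6), (24, 7), (28, 8), (30, 9)]) 20 = some 6 from by decide,
    show PySem.Dict.get? (PySem.Dict.ofList [((4:Int),(2:Int)), (8, 3), (12, 4), (16, 5), (20, 6), (24, 7), (28, 8), (30, 9)]) 24 = some 7 from by decide,
    show PySem.Dict.get? (PySem.Dict.ofList [((4:Int),(2:Int)), (8, 3), (12, 4), (16, 5), (20, 6), (24, 7), (28, 8), (30, 9)]) 28 = some 8 from by decide,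
    show PySem.Dict.get? (PySem.Dict.ofList [((4:Int),(2:Int)), (8, 3), (12, 4), (16, 5), (20, 6), (24, 7), (28, 8), (30, 9)]) 30 = some 9 from by decide]
  split_ifs <;>
    first
      | rfl
      | (exfalso; omega)
      | (simp only [Option.some.injEq]; omega)
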